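-- pv_equiv track=rewrite | github.com/DRose492/SecurityandSecureCoding | Alex_Sampson_M02.py | Input_Format
-- ===== SOURCE A (Python) =====
-- def Input_Format(Text):
--     Text = Text.upper().replace("J","I").replace(" ","")
--     Text02 = ""
--     for char in Text:
--         if char.isnumeric() or not char.isalpha():
--             Text02 += char * 2
--         else:
--             Text02 += char
--     Text = Text02
--     Pairs = []
--     i = 0
--
--     while i < len(Text):
--         a = Text[i]
--         if (i + 1) < len(Text) and Text[i + 1].isalpha():
--             b = Text[i + 1]
--             if a == b:
--                 Pairs.append((a, "Z"))
--                 i += 1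
--             else:
--                 Pairs.append((a, b))
--                 i += 2
--         elif (i + 1) < len(Text) and not a.isalpha() and not Text[i + 1].isalpha():
--             b = Text[i + 1]
--             Pairs.append((a, b))
--             i += 2
--         else:
--             Pairs.append((a, "Z"))
--             i += 1
--
--     return Pairs
-- ===== SOURCE B (Python) =====
-- def Input_Format(Text):
--     # One pass over the cleaned text; no intermediate doubled string.
--     t = Text.upper().replace("J", "I").replace(" ", "")
--     pairs = []
--     i = 0
--     n = len(t)
--     while i < n:
--         a = t[i]
--         if not a.isalpha():
--             pairs.append((a, a))
--             i += 1
--         elif i + 1 < n and t[i + 1].isalpha() and t[i + 1] != a: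
--             pairs.append((a, t[i + 1]))
--             i += 2
--         else:
--             pairs.append((a, "Z"))
--             i += 1
--     return pairs
-- ===== Notes on version B (the rewrite author's own statement) =====
-- stated objective: simpler
-- what changed: B drops A's first pass entirely: instead of building an intermediate string with every non-letter doubled and then pairing that string, B makes one lookahead scan of the cleaned text, emitting a self-pair for each non-letter and pairing/Z-padding letters directly.
import Mathlib
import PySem

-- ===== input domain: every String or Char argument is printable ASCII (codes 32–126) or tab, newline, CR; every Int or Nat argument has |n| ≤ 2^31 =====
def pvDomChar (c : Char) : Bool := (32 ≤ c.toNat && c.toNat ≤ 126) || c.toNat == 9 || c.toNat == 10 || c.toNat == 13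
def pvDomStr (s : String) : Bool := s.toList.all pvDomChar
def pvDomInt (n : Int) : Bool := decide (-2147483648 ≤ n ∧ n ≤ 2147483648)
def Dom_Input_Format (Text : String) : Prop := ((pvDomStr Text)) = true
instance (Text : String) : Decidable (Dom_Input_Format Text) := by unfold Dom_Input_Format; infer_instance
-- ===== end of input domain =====

-- B replaces A's two passes (double every non-letter, then pair the doubled string) by one
-- lookahead scan of the cleaned text; objective: simpler (no intermediate doubled string).

-- ===== PORT A =====
-- Text.upper().replace("J","I").replace(" ","") — the cleaning line both Pythons share verbatim
def pvClean (Text : String) : List Char :=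
  PySem.Chars.replace (PySem.Chars.replace (PySem.Chars.upper Text.toList) ['J'] ['I']) [' '] []

-- body of A's first loop; char.isnumeric() ported as PySem.Chars.isdigit (exact on the ASCII domain)
def pvDoubleStep (acc : List Char) (c : Char) : List Char :=
  if PySem.Chars.isdigit c || !(PySem.Chars.isalpha c) then acc ++ [c, c] else acc ++ [c]

-- A's while loop: i advances by 1 or 2 over Text02; ported as recursion on the rest of the list
def pvPairA : List Char → List (String × String)
  | [] => []
  | [a] => [(String.ofList [a], "Z")]
  | a :: b :: rest =>
    if PySem.Chars.isalpha b then
      if a = b then (String.ofList [a], "Z") :: pvPairA (b :: rest)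
      else (String.ofList [a], String.ofList [b]) :: pvPairA rest
    else if !(PySem.Chars.isalpha a) && !(PySem.Chars.isalpha b) then
      (String.ofList [a], String.ofList [b]) :: pvPairA rest
    else (String.ofList [a], "Z") :: pvPairA (b :: rest)

def Input_Format (Text : String) : List (String × String) :=
  pvPairA ((pvClean Text).foldl pvDoubleStep [])

-- ===== PORT B =====
-- Source B's single scan of the cleaned text (no doubled intermediate)
def pvPairB : List Char → List (String × String)
  | [] => []
  | [a] =>
    if !(PySem.Chars.isalpha a) then [(String.ofList [a], String.ofList [a])]
    else [(String.ofList [a], "Z")]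
  | a :: b :: rest =>
    if !(PySem.Chars.isalpha a) then (String.ofList [a], String.ofList [a]) :: pvPairB (b :: rest)
    else if PySem.Chars.isalpha b && b != a then
      (String.ofList [a], String.ofList [b]) :: pvPairB rest
    else (String.ofList [a], "Z") :: pvPairB (b :: rest)

def Input_Format_alt (Text : String) : List (String × String) :=
  pvPairB (pvClean Text)

-- ===== PRECONDITION & SPEC =====
def Spec_Input_Format (Text : String) (out : List (String × String)) : Prop := out = Input_Format_alt Text
instance (Text : String) (out : List (String × String)) : Decidable (Spec_Input_Format Text out) := by unfold Spec_Input_Format; infer_instance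

-- ===== CLAIM (what is proved, stated in full; the proofs are below) =====
def Claim_equal_Input_Format : Prop := ∀ (Text : String), Dom_Input_Format Text → Spec_Input_Format Text (Input_Format Text)

-- ===== LEMMAS AND PROOFS =====

-- what A's first loop appends for one char
def pvDbl (c : Char) : List Char :=
  if PySem.Chars.isdigit c || !(PySem.Chars.isalpha c) then [c, c] else [c]

lemma pvDoubleStep_eq (acc : List Char) (c : Char) : pvDoubleStep acc c = acc ++ pvDbl c := by
  unfold pvDoubleStep pvDbl; split_ifs <;> rfl

lemma pvDouble_eq_flatMap (l : List Char) : l.foldl pvDoubleStep [] = l.flatMap pvDbl := by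
  have h : l.foldl pvDoubleStep [] = l.foldl (fun acc c => acc ++ pvDbl c) [] := by
    congr 1; funext acc c; exact pvDoubleStep_eq acc c
  rw [h, PySem.List.foldl_append_eq_flatMap]; rfl

lemma pvDigit_of_alpha (c : Char) (h : PySem.Chars.isalpha c = true) :
    PySem.Chars.isdigit c = false := by
  have hA : 'A'.val.toNat = 65 := rfl
  have hZ : 'Z'.val.toNat = 90 := rfl
  have ha : 'a'.val.toNat = 97 := rfl
  have hz : 'z'.val.toNat = 122 := rfl
  have h0 : '0'.val.toNat = 48 := rfl
  have h9 : '9'.val.toNat = 57 := rfl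
  rw [Bool.eq_false_iff]
  intro hd
  simp only [PySem.Chars.isalpha, PySem.Chars.isdigit, PySem.Chars.isupper, PySem.Chars.islower,
    Bool.or_eq_true, Bool.and_eq_true, decide_eq_true_eq, Char.le_def, UInt32.le_iff_toNat_le,
    hA, hZ, ha, hz, h0, h9] at h hd
  omega

lemma pvDbl_alpha (c : Char) (h : PySem.Chars.isalpha c = true) : pvDbl c = [c] := by
  simp [pvDbl, h, pvDigit_of_alpha c h]

lemma pvDbl_not_alpha (c : Char) (h : PySem.Chars.isalpha c = false) : pvDbl c = [c, c] := by
  simp [pvDbl, h]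

lemma pvPairB_cons_not_alpha (d : Char) (h : PySem.Chars.isalpha d = false) (r : List Char) :
    pvPairB (d :: r) = (String.ofList [d], String.ofList [d]) :: pvPairB r := by
  cases r <;> simp [pvPairB, h]

lemma pvPairA_flatMap (n : Nat) : ∀ l : List Char, l.length ≤ n →
    pvPairA (l.flatMap pvDbl) = pvPairB l := by
  induction n with
  | zero =>
    intro l hl
    have : l = [] := List.length_eq_zero_iff.mp (Nat.le_zero.mp hl)
    subst this; rfl
  | succ n ih =>
    intro l hl
    match l with
    | [] => rfl
    | c :: rest =>
      by_cases hc : PySem.Chars.isalpha c = true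
      · -- letter: contributes [c] to the doubled text
        match rest with
        | [] => simp [pvDbl_alpha c hc, pvPairA, pvPairB, hc]
        | d :: rest2 =>
          by_cases hd : PySem.Chars.isalpha d = true
          · by_cases hcd : c = d
            · subst hcd
              have hx : (c :: c :: rest2).flatMap pvDbl
                  = c :: ((c :: rest2).flatMap pvDbl) := by
                simp [pvDbl_alpha c hc]
              have hrec := ih (c :: rest2) (by simpa using Nat.le_of_succ_le_succ hl)
              have hy : (c :: rest2).flatMap pvDbl = c :: rest2.flatMap pvDbl := by
                simp [pvDbl_alpha c hc]
              rw [hx, hy]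
              rw [hy] at hrec
              simp [pvPairA, pvPairB, hc, hrec]
            · have hx : (c :: d :: rest2).flatMap pvDbl
                  = c :: d :: rest2.flatMap pvDbl := by
                simp [pvDbl_alpha c hc, pvDbl_alpha d hd]
              have hrec := ih rest2 (by simp at hl; omega)
              have hne : (d != c) = true := by
                simp only [bne_iff_ne, ne_eq]; exact fun h => hcd h.symm
              rw [hx]
              simp [pvPairA, pvPairB, hc, hd, hcd, hne, hrec]
          · -- letter then non-letter: both sides pad with Z and move on by one letter
            have hd' : PySem.Chars.isalpha d = false := by simpa using hd
            have hx : (c :: d :: rest2).flatMap pvDbl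
                = c :: d :: d :: rest2.flatMap pvDbl := by
              simp [pvDbl_alpha c hc, pvDbl_not_alpha d hd']
            have h1 : pvPairB (c :: d :: rest2)
                = (String.ofList [c], "Z") :: pvPairB (d :: rest2) := by
              simp [pvPairB, hc, hd']
            rw [hx, h1, pvPairB_cons_not_alpha d hd' rest2,
              ← ih rest2 (by simp at hl; omega)]
            simp [pvPairA, hc, hd']
      · -- non-letter: doubled in A, a self-pair on both sides
        have hc' : PySem.Chars.isalpha c = false := by simpa using hc
        have hx : (c :: rest).flatMap pvDbl = c :: c :: rest.flatMap pvDbl := by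
          simp [pvDbl_not_alpha c hc']
        rw [hx, pvPairB_cons_not_alpha c hc' rest, ← ih rest (Nat.le_of_succ_le_succ hl)]
        simp [pvPairA, hc']

-- ===== VERDICT (by name: the statement is the Claim_ definition above) =====
theorem Input_Format_spec : Claim_equal_Input_Format := by
  intro Text _
  unfold Spec_Input_Format Input_Format Input_Format_alt
  rw [pvDouble_eq_flatMap]
  exact pvPairA_flatMap (pvClean Text).length (pvClean Text) le_rfl
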